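-- pv_equiv track=rewrite | github.com/Drovwosek/hearyou | packages/stt-service/speaker_diarization_pyannote.py | format_with_speakers
-- ===== SOURCE A (Python) =====
-- from typing import List, Dict, Optional
--
-- def format_with_speakers(words: List[Dict]) -> str:
--     """
--     Форматирует текст с разделением по спикерам
--
--     Args:
--         words: Слова с полем speaker
--
--     Returns:
--         Отформатированный текст с разделением спикеров
--     """
--     if not words:
--         return ""
--
--     lines = []
--     current_speaker = None
--     current_line = []
--
--     for word in words:
--         speaker = word.get("speaker", "UNKNOWN")
--         word_text = word.get("word", "")
--
--         if speaker != current_speaker: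
--             # Новый спикер - сохраняем предыдущую строку
--             if current_line:
--                 lines.append(f"{current_speaker}: {' '.join(current_line)}")
--
--             current_speaker = speaker
--             current_line = [word_text]
--         else:
--             current_line.append(word_text)
--
--     # Последняя строка
--     if current_line:
--         lines.append(f"{current_speaker}: {' '.join(current_line)}")
--
--     return "\n\n".join(lines)
-- ===== SOURCE B (Python) =====
-- def format_with_speakers(words):
--     """Per-word rendering: each word is paired with its predecessor and mapped to
--     one string piece (label + word at a speaker change, just the word after a
--     space otherwise); the pieces are concatenated with ''.join. No line buffer,
--     no speaker sentinel, no end-of-loop flush."""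
--     prevs = [None] + list(words)
--     pieces = []
--     for prev, w in zip(prevs, words):
--         sp = w.get("speaker", "UNKNOWN")
--         txt = w.get("word", "")
--         if prev is None:
--             pieces.append(sp + ": " + txt)
--         elif sp == prev.get("speaker", "UNKNOWN"):
--             pieces.append(" " + txt)
--         else:
--             pieces.append("\n\n" + sp + ": " + txt)
--     return "".join(pieces)
-- ===== Notes on version B (the rewrite author's own statement) =====
-- stated objective: alternative
-- what changed: Instead of buffering words into per-speaker lines with a current_speaker sentinel and a duplicated flush, B pairs each word with its predecessor and maps it directly to one output piece (speaker label + word at a change, ' '+word otherwise), concatenating all pieces with ''.join — no group buffer or flush exists.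
import Mathlib
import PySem

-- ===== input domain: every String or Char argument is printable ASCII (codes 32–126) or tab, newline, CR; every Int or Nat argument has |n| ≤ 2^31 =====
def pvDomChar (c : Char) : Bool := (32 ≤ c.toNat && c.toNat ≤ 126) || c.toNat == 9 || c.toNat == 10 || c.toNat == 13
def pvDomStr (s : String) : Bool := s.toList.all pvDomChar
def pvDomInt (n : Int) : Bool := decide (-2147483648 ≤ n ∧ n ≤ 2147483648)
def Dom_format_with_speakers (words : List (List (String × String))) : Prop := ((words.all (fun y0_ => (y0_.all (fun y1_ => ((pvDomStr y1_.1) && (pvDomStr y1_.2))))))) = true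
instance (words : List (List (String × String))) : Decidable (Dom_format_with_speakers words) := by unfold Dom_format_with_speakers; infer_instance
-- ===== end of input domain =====

-- B replaces A's line buffer / current_speaker sentinel / end-of-loop flush by a flat
-- per-word rendering: each word, paired with its predecessor, is mapped to one output
-- piece and the pieces are concatenated (alternative decomposition, same cost).

-- shared primitive: Python dict.get on an association list (first match)
def dictGet (d : List (String × String)) (k dflt : String) : String :=
  match d.find? (fun p => p.1 == k) with
  | some p => p.2
  | none => dflt

-- ===== PORT A =====
-- f"{current_speaker}: {' '.join(current_line)}" with current_speaker : Option String (str(None) = "None")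
def aRender (sp : Option String) (line : List String) : String :=
  (match sp with | none => "None" | some s => s) ++ ": " ++ PySem.Str.join " " line

-- one iteration of A's for-loop over state (lines, current_speaker, current_line)
def aStep (st : List String × Option String × List String) (w : List (String × String)) :
    List String × Option String × List String :=
  let speaker := dictGet w "speaker" "UNKNOWN"
  let word_text := dictGet w "word" ""
  match st with
  | (lines, cur_sp, cur_line) =>
    if some speaker ≠ cur_sp then
      ((if cur_line ≠ [] then lines ++ [aRender cur_sp cur_line] else lines),
       some speaker, [word_text])
    else
      (lines, cur_sp, cur_line ++ [word_text])

def format_with_speakers (words : List (List (String × String))) : String :=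
  if words = [] then ""
  else
    match words.foldl aStep ([], none, []) with
    | (lines, cur_sp, cur_line) =>
      PySem.Str.join "\n\n"
        (if cur_line ≠ [] then lines ++ [aRender cur_sp cur_line] else lines)

-- ===== PORT B =====
-- the piece contributed by word w whose predecessor is prev (none for the first word)
def bPiece (prev : Option (List (String × String))) (w : List (String × String)) : String :=
  let sp := dictGet w "speaker" "UNKNOWN"
  let txt := dictGet w "word" ""
  match prev with
  | none => sp ++ ": " ++ txt
  | some p =>
    if sp = dictGet p "speaker" "UNKNOWN" then " " ++ txt
    else "\n\n" ++ sp ++ ": " ++ txt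

def format_with_speakers_alt (words : List (List (String × String))) : String :=
  -- prevs = [None] + words; zip(prevs, words); ''.join(pieces)
  PySem.Str.join ""
    (((none :: words.map some).zip words).map (fun pw => bPiece pw.1 pw.2))

-- ===== PRECONDITION & SPEC =====
def Spec_format_with_speakers (words : List (List (String × String))) (out : String) : Prop := out = format_with_speakers_alt words
instance (words : List (List (String × String))) (out : String) : Decidable (Spec_format_with_speakers words out) := by unfold Spec_format_with_speakers; infer_instance

-- ===== CLAIM (what is proved, stated in full; the proofs are below) =====
def Claim_equal_format_with_speakers : Prop := ∀ (words : List (List (String × String))), Dom_format_with_speakers words → Spec_format_with_speakers words (format_with_speakers words)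

-- ===== LEMMAS AND PROOFS =====

theorem chars_join_single (sep x : List Char) : PySem.Chars.join sep [x] = x := by
  simp [PySem.Chars.join, List.intercalate]

theorem chars_join_cons_cons (sep x y : List Char) (t : List (List Char)) :
    PySem.Chars.join sep (x :: y :: t) = x ++ sep ++ PySem.Chars.join sep (y :: t) := by
  simp [PySem.Chars.join, List.intercalate, List.intersperse]

theorem chars_join_append_sep (sep : List Char) (l : List (List Char)) (z : List Char)
    (h : l ≠ []) :
    PySem.Chars.join sep (l ++ [z]) = PySem.Chars.join sep l ++ sep ++ z := by
  induction l with
  | nil => simp at h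
  | cons a t ih =>
    cases t with
    | nil => simp [chars_join_cons_cons]
    | cons b t' =>
      rw [show a :: b :: t' ++ [z] = a :: (b :: t' ++ [z]) from rfl,
        show b :: t' ++ [z] = b :: (t' ++ [z]) from rfl, chars_join_cons_cons,
        show b :: (t' ++ [z]) = b :: t' ++ [z] from rfl, ih (by simp), chars_join_cons_cons]
      simp

theorem chars_join_append_last (sep : List Char) (l : List (List Char)) (x y : List Char) :
    PySem.Chars.join sep (l ++ [x ++ y]) = PySem.Chars.join sep (l ++ [x]) ++ y := by
  cases l with
  | nil => simp
  | cons a t =>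
    rw [chars_join_append_sep _ _ _ (by simp), chars_join_append_sep _ _ _ (by simp)]
    simp

-- String-level versions
theorem joinS_append_sep (sep : String) (l : List String) (z : String) (h : l ≠ []) :
    PySem.Str.join sep (l ++ [z]) = PySem.Str.join sep l ++ sep ++ z := by
  simp only [PySem.Str.join, List.map_append, List.map_cons, List.map_nil]
  rw [chars_join_append_sep _ _ _ (by simpa using h)]
  apply String.ext
  simp

theorem joinS_append_last (sep : String) (l : List String) (x y : String) :
    PySem.Str.join sep (l ++ [x ++ y]) = PySem.Str.join sep (l ++ [x]) ++ y := by
  simp only [PySem.Str.join, List.map_append, List.map_cons, List.map_nil]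
  rw [show (x ++ y).toList = x.toList ++ y.toList by simp, chars_join_append_last]
  apply String.ext
  simp

-- B's rendering of the rest of the list, given the previous word's speaker
def bRest (s : String) : List (List (String × String)) → String
  | [] => ""
  | w :: t =>
    (if dictGet w "speaker" "UNKNOWN" = s then " " ++ dictGet w "word" ""
     else "\n\n" ++ dictGet w "speaker" "UNKNOWN" ++ ": " ++ dictGet w "word" "") ++
    bRest (dictGet w "speaker" "UNKNOWN") t

-- ''.join of the zipped pieces = head piece ++ bRest (pieces only depend on prev's speaker)
theorem bRest_spec (p : List (String × String)) (ws : List (List (String × String))) :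
    PySem.Str.join "" (((some p :: ws.map some).zip ws).map (fun pw => bPiece pw.1 pw.2)) =
      bRest (dictGet p "speaker" "UNKNOWN") ws := by
  induction ws generalizing p with
  | nil => rfl
  | cons w t ih =>
    rw [List.map_cons, List.zip_cons_cons, List.map_cons]
    cases h : ((some w :: t.map some).zip t).map (fun pw => bPiece pw.1 pw.2) with
    | nil =>
      have : t = [] := by
        cases t with
        | nil => rfl
        | cons a b => simp [List.zip_cons_cons] at h
      subst this
      simp only [PySem.Str.join, List.map_cons, List.map_nil, chars_join_single]
      simp [bRest, bPiece]
    | cons q qt =>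
      have hj : PySem.Str.join "" (bPiece (some p) w :: q :: qt) =
          bPiece (some p) w ++ PySem.Str.join "" (q :: qt) := by
        simp only [PySem.Str.join, List.map_cons, chars_join_cons_cons]
        apply String.ext
        simp
      rw [hj, ← h, ih w]
      simp [bRest, bPiece]

-- A's loop invariant: from a live state (lines, some s, cur) with cur ≠ [],
-- the remaining fold + final flush render lines, the open group, then bRest s ws
theorem main_inv (ws : List (List (String × String))) :
    ∀ (lines : List String) (s : String) (cur : List String), cur ≠ [] →
    PySem.Str.join "\n\n"
      (if (ws.foldl aStep (lines, some s, cur)).2.2 ≠ [] then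
        (ws.foldl aStep (lines, some s, cur)).1 ++
          [aRender (ws.foldl aStep (lines, some s, cur)).2.1
            (ws.foldl aStep (lines, some s, cur)).2.2]
       else (ws.foldl aStep (lines, some s, cur)).1)
    = PySem.Str.join "\n\n" (lines ++ [aRender (some s) cur]) ++ bRest s ws := by
  induction ws with
  | nil =>
    intro lines s cur hcur
    simp [List.foldl, hcur, bRest]
  | cons w t ih =>
    intro lines s cur hcur
    by_cases hk : dictGet w "speaker" "UNKNOWN" = s
    · have hstep : aStep (lines, some s, cur) w =
          (lines, some s, cur ++ [dictGet w "word" ""]) := by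
        simp [aStep, hk]
      rw [List.foldl_cons, hstep, ih lines s _ (by simp)]
      have hline : aRender (some s) (cur ++ [dictGet w "word" ""]) =
          aRender (some s) cur ++ (" " ++ dictGet w "word" "") := by
        simp only [aRender]
        rw [joinS_append_sep _ _ _ hcur]
        simp [String.append_assoc]
      rw [hline,
        joinS_append_last "\n\n" lines (aRender (some s) cur) (" " ++ dictGet w "word" "")]
      simp [bRest, hk, String.append_assoc]
    · have hstep : aStep (lines, some s, cur) w =
          (lines ++ [aRender (some s) cur],
           some (dictGet w "speaker" "UNKNOWN"), [dictGet w "word" ""]) := by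
        simp [aStep, hcur]
        intro h; exact absurd h hk
      rw [List.foldl_cons, hstep, ih _ _ _ (by simp)]
      rw [joinS_append_sep _ _ _ (by simp)]
      simp [bRest, hk, aRender, PySem.Str.join, String.append_assoc]

-- ===== VERDICT (by name: the statement is the Claim_ definition above) =====
theorem format_with_speakers_spec : Claim_equal_format_with_speakers := by
  intro words _
  unfold Spec_format_with_speakers
  cases words with
  | nil => rfl
  | cons w ws =>
    have hstep : aStep ([], none, []) w =
        ([], some (dictGet w "speaker" "UNKNOWN"), [dictGet w "word" ""]) := by
      simp [aStep]
    rw [format_with_speakers, format_with_speakers_alt]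
    simp only [reduceCtorEq, if_false, List.foldl_cons, hstep]
    rw [main_inv ws [] _ _ (by simp)]
    rw [List.map_cons, List.zip_cons_cons, List.map_cons]
    cases hz : ((some w :: ws.map some).zip ws).map (fun pw => bPiece pw.1 pw.2) with
    | nil =>
      have hws : ws = [] := by
        cases ws with
        | nil => rfl
        | cons a b => simp [List.zip_cons_cons] at hz
      subst hws
      simp only [PySem.Str.join, List.map_cons, List.map_nil, List.nil_append,
        chars_join_single, bRest]
      simp [aRender, bPiece]
    | cons q qt =>
      have hj : PySem.Str.join "" (bPiece none w :: q :: qt) =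
          bPiece none w ++ PySem.Str.join "" (q :: qt) := by
        simp only [PySem.Str.join, List.map_cons, chars_join_cons_cons]
        apply String.ext
        simp
      rw [hj, ← hz, bRest_spec w ws]
      simp only [List.nil_append, PySem.Str.join, List.map_cons, List.map_nil,
        chars_join_single]
      simp [aRender, bPiece, PySem.Str.join]
      apply String.ext
      simp
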